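-- pv_equiv track=rewrite | github.com/OtoStanko/Maze | m.py | delete_tuples_after
-- ===== SOURCE A (Python) =====
-- def delete_tuples_after(lst, target_tuple):
--     filtered_lst = []
--     found_target = False
--
--     for t in lst:
--         if t == target_tuple:
--             found_target = True
--
--         if not found_target:
--             filtered_lst.append(t)
--
--     return filtered_lst
-- ===== SOURCE B (Python) =====
-- def delete_tuples_after(lst, target_tuple):
--     try:
--         return lst[:lst.index(target_tuple)]
--     except ValueError:
--         return lst[:]
-- ===== Notes on version B (the rewrite author's own statement) =====
-- stated objective: simpler
-- what changed: Replaces the element-by-element accumulation loop with a found_target flag by a single index lookup (list.index in try/except) followed by one slice.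
import Mathlib
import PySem

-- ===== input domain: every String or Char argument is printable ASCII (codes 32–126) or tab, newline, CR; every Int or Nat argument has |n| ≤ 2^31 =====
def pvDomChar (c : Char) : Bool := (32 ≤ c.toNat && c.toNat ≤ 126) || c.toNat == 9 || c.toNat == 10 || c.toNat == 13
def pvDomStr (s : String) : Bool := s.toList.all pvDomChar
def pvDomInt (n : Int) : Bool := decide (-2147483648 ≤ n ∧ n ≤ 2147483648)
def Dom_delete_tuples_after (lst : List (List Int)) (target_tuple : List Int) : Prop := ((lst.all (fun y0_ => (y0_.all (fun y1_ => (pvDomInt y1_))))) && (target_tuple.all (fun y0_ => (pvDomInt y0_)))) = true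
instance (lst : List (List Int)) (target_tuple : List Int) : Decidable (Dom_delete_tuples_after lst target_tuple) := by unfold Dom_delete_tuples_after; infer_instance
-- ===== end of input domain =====

-- B replaces A's accumulation loop with found_target flag by one index lookup plus one slice (objective: simpler).

-- ===== PORT A =====
-- loop body of A: update found_target, conditionally append t
def stepA (target_tuple : List Int) (st : List (List Int) × Bool) (t : List Int) : List (List Int) × Bool :=
  let found := if t = target_tuple then true else st.2
  (if !found then st.1 ++ [t] else st.1, found)

def delete_tuples_after (lst : List (List Int)) (target_tuple : List Int) : List (List Int) :=
  (lst.foldl (stepA target_tuple) ([], false)).1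

-- ===== PORT B =====
-- lst.index(target_tuple) inside try/except; lst[:idx] on success, lst[:] on ValueError
def delete_tuples_after_alt (lst : List (List Int)) (target_tuple : List Int) : List (List Int) :=
  match PySem.List.index? lst target_tuple with
  | some i => PySem.List.slice lst none (some (i : Int))
  | none => lst

-- ===== PRECONDITION & SPEC =====
def Spec_delete_tuples_after (lst : List (List Int)) (target_tuple : List Int) (out : List (List Int)) : Prop := out = delete_tuples_after_alt lst target_tuple
instance (lst : List (List Int)) (target_tuple : List Int) (out : List (List Int)) : Decidable (Spec_delete_tuples_after lst target_tuple out) := by unfold Spec_delete_tuples_after; infer_instance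

-- ===== CLAIM (what is proved, stated in full; the proofs are below) =====
def Claim_equal_delete_tuples_after : Prop := ∀ (lst : List (List Int)) (target_tuple : List Int), Dom_delete_tuples_after lst target_tuple → Spec_delete_tuples_after lst target_tuple (delete_tuples_after lst target_tuple)

-- ===== LEMMAS AND PROOFS =====

-- once found_target is true, A's loop never appends again
theorem foldA_true (tgt : List Int) : ∀ (lst : List (List Int)) (acc : List (List Int)),
    (lst.foldl (stepA tgt) (acc, true)).1 = acc := by
  intro lst
  induction lst with
  | nil => intro acc; rfl
  | cons x xs ih =>
    intro acc
    have hs : stepA tgt (acc, true) x = (acc, true) := by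
      simp [stepA]
    rw [List.foldl_cons, hs]
    exact ih acc

-- with found_target still false, the loop appends exactly B's result
theorem foldA_false (tgt : List Int) : ∀ (lst : List (List Int)) (acc : List (List Int)),
    (lst.foldl (stepA tgt) (acc, false)).1 = acc ++ delete_tuples_after_alt lst tgt := by
  intro lst
  induction lst with
  | nil => intro acc; simp [delete_tuples_after_alt, PySem.List.index?]
  | cons x xs ih =>
    intro acc
    by_cases hx : x = tgt
    · subst hx
      have hs : stepA x (acc, false) x = (acc, true) := by
        simp [stepA]
      rw [List.foldl_cons, hs, foldA_true]
      unfold delete_tuples_after_alt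
      rw [PySem.List.index?_cons_self]
      show acc = acc ++ PySem.List.slice (x :: xs) none (some ((0 : Nat) : Int))
      rw [PySem.List.slice_to_natCast]
      simp
    · have hs : stepA tgt (acc, false) x = (acc ++ [x], false) := by
        simp [stepA, hx]
      rw [List.foldl_cons, hs, ih]
      unfold delete_tuples_after_alt
      rw [PySem.List.index?_cons_of_ne xs hx]
      cases hidx : PySem.List.index? xs tgt with
      | none => simp
      | some i =>
        simp only [Option.map_some]
        have h1 : PySem.List.slice xs (none : Option Int) (some (i : Int)) = xs.take i :=
          PySem.List.slice_to_natCast xs i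
        have h2 : PySem.List.slice (x :: xs) (none : Option Int) (some ((i + 1 : Nat) : Int))
            = (x :: xs).take (i + 1) := PySem.List.slice_to_natCast (x :: xs) (i + 1)
        rw [h1, h2, List.take_succ_cons, List.append_assoc, List.singleton_append]

-- ===== VERDICT (by name: the statement is the Claim_ definition above) =====
theorem delete_tuples_after_spec : Claim_equal_delete_tuples_after := by
  intro lst tgt _
  show delete_tuples_after lst tgt = delete_tuples_after_alt lst tgt
  unfold delete_tuples_after
  simpa using foldA_false tgt lst []
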